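-- pv_equiv track=rewrite | github.com/junhaz4/leetcode-notes | OA&Interview/Virtu_financial_interview.py | get_sum_vowels
-- ===== SOURCE A (Python) =====
-- from collections import defaultdict
-- from collections import defaultdict
--
-- def get_sum_vowels(string):
--   res = 0
--   vowels = {"a":1, "e":2, "i":3, "o":4, "u":5}
--   count = defaultdict(int)
--   for char in string:
--     if char in vowels:
--       count[char] += 1
--   for char in count.keys():
--     res += vowels[char]*count[char]
--   return res
-- ===== SOURCE B (Python) =====
-- def get_sum_vowels(string):
--   vowels = {"a":1, "e":2, "i":3, "o":4, "u":5}
--   res = 0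
--   for char in string:
--     if char in vowels:
--       res += vowels[char]
--   return res
-- ===== Notes on version B (the rewrite author's own statement) =====
-- stated objective: simpler
-- what changed: Replaced the count-then-reduce shape (build a defaultdict of per-vowel counts, then a second loop over its keys multiplying weight by count) with a single direct accumulation that adds the vowel's weight as each character is seen; the intermediate count table and the second loop disappear.
import Mathlib
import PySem

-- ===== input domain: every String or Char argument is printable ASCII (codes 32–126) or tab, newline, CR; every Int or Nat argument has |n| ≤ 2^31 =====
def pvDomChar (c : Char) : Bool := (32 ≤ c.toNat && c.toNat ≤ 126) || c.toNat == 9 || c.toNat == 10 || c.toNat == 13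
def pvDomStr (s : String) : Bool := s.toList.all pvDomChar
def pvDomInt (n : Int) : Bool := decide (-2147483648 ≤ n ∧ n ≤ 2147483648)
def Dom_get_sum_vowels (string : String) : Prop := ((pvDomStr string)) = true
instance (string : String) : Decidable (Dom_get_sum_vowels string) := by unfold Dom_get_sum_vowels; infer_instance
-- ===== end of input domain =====

-- B drops A's intermediate count table and second loop over its keys, accumulating
-- the weight of each vowel directly in one pass (objective: simpler).

-- the weight map {"a":1, "e":2, "i":3, "o":4, "u":5} both Pythons define locally
def pvVowels : PySem.Dict Char Int :=
  PySem.Dict.ofList [('a', 1), ('e', 2), ('i', 3), ('o', 4), ('u', 5)]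

-- ===== PORT A =====
def get_sum_vowels (string : String) : Int :=
  let res : Int := 0
  let vowels := pvVowels
  let count : PySem.Dict Char Int :=
    string.toList.foldl
      (fun d char => if vowels.contains char then d.modify char 0 (· + 1) else d)
      PySem.Dict.empty
  count.keys.foldl (fun res char => res + vowels.getD char 0 * count.getD char 0) res

-- ===== PORT B =====
def get_sum_vowels_alt (string : String) : Int :=
  string.toList.foldl
    (fun res char => if pvVowels.contains char then res + pvVowels.getD char 0 else res)
    0

-- ===== PRECONDITION & SPEC =====
def Spec_get_sum_vowels (string : String) (out : Int) : Prop := out = get_sum_vowels_alt string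
instance (string : String) (out : Int) : Decidable (Spec_get_sum_vowels string out) := by unfold Spec_get_sum_vowels; infer_instance

-- ===== CLAIM (what is proved, stated in full; the proofs are below) =====
def Claim_equal_get_sum_vowels : Prop := ∀ (string : String), Dom_get_sum_vowels string → Spec_get_sum_vowels string (get_sum_vowels string)

-- ===== LEMMAS AND PROOFS =====

-- summing an indicator that is nonzero only at x over a nodup list containing x yields w x
theorem pv_sum_single {α : Type} [DecidableEq α] (w : α → Int) (x : α) :
    ∀ (ks : List α), ks.Nodup → x ∈ ks →
      (ks.map (fun c => if c = x then w c else 0)).sum = w x := by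
  intro ks
  induction ks with
  | nil => intro _ h; cases h
  | cons k t ih =>
    intro hnd hmem
    rcases List.nodup_cons.mp hnd with ⟨hk, hndt⟩
    by_cases hkx : k = x
    · subst hkx
      have hz : (t.map (fun c => if c = k then w c else 0)).sum = 0 := by
        apply List.sum_eq_zero
        intro y hy
        rcases List.mem_map.mp hy with ⟨c, hc, rfl⟩
        have : c ≠ k := fun h => hk (h ▸ hc)
        simp [this]
      simp [hz]
    · have hx : x ∈ t := by
        cases hmem with
        | head => exact absurd rfl hkx
        | tail _ h => exact h
      simp [hkx, ih hndt hx]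

-- sum over the distinct keys of weight·multiplicity = plain sum of weights
theorem pv_weighted_count_sum {α : Type} [DecidableEq α] (w : α → Int) :
    ∀ (fl ks : List α), ks.Nodup → (∀ c ∈ fl, c ∈ ks) →
      (ks.map (fun c => w c * (fl.count c : Int))).sum = (fl.map w).sum := by
  intro fl
  induction fl with
  | nil =>
    intro ks _ _
    simp
  | cons x t ih =>
    intro ks hnd hsub
    have hxks : x ∈ ks := hsub x (List.mem_cons_self)
    have hstep :
        (ks.map (fun c => w c * ((x :: t).count c : Int))).sum
          = (ks.map (fun c => w c * (t.count c : Int))).sum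
            + (ks.map (fun c => if c = x then w c else 0)).sum := by
      rw [← List.sum_map_add]
      apply congrArg
      apply List.map_congr_left
      intro c _
      by_cases hcx : c = x
      · subst hcx
        simp
        ring
      · simp only [List.count_cons, hcx]
        simp
        exact Or.inl (Ne.symm hcx)
    rw [hstep, ih ks hnd (fun c hc => hsub c (List.mem_cons_of_mem _ hc)),
        pv_sum_single w x ks hnd hxks]
    simp only [List.map_cons, List.sum_cons]
    ring
-- the two loop shapes agree for every character list
theorem pv_main (l : List Char) :
    (let count := l.foldl
        (fun d char => if pvVowels.contains char then d.modify char 0 (· + 1) else d)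
        PySem.Dict.empty
     count.keys.foldl (fun res char => res + pvVowels.getD char 0 * count.getD char 0) (0 : Int))
      = l.foldl
          (fun res char => if pvVowels.contains char then res + pvVowels.getD char 0 else res)
          (0 : Int) := by
  have hcount :
      l.foldl (fun d char => if pvVowels.contains char then d.modify char 0 (· + 1) else d)
        PySem.Dict.empty
        = PySem.Dict.counter (l.filter (fun char => pvVowels.contains char)) := by
    rw [PySem.Dict.counter_eq_foldl, List.foldl_filter]
  simp only [hcount, PySem.Dict.keys_counter, PySem.Dict.getD_counter]
  rw [← List.foldl_filter, PySem.List.foldl_add, PySem.List.foldl_add]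
  simp only [zero_add]
  exact pv_weighted_count_sum (fun c => pvVowels.getD c 0)
    (l.filter (fun char => pvVowels.contains char))
    (PySem.Set.ofList (l.filter (fun char => pvVowels.contains char)))
    (PySem.Set.nodup_ofList _) (fun c hc => (PySem.Set.mem_ofList _ _).mpr hc)

-- ===== VERDICT (by name: the statement is the Claim_ definition above) =====
theorem get_sum_vowels_spec : Claim_equal_get_sum_vowels := by
  intro s _
  exact pv_main s.toList
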